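-- pv_equiv track=rewrite | github.com/daisyzl/program-exercise-python | Binarysearch/changduzuixiaozishuzu_ver2.py | _windowEx
-- ===== SOURCE A (Python) =====
-- def _windowEx(nums, size, s): #函数是设置窗口的大小，最开始的大小为mid
--     sum = 0
--     for i in range(len(nums)):
--         if i>= size:
--             #注意这里要有等于号
--             sum -= nums[i-size]
--         sum += nums[i]
--         if sum >= s:
--             return True
--     return False
-- ===== SOURCE B (Python) =====
-- def _windowEx(nums, size, s):
--     prefix = [0]
--     for x in nums:
--         prefix.append(prefix[-1] + x)
--     for i in range(len(nums)):
--         if prefix[i + 1] - prefix[max(0, i + 1 - size)] >= s: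
--             return True
--     return False
-- ===== Notes on version B (the rewrite author's own statement) =====
-- stated objective: alternative
-- what changed: B precomputes a prefix-sum table and tests each window by the subtraction P[i+1]-P[max(0,i+1-size)], replacing A's incrementally maintained running window sum.
-- outside the precondition, e.g. on _windowEx([10, 0], -1, 5): A returns True, B raises IndexError
import Mathlib
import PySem

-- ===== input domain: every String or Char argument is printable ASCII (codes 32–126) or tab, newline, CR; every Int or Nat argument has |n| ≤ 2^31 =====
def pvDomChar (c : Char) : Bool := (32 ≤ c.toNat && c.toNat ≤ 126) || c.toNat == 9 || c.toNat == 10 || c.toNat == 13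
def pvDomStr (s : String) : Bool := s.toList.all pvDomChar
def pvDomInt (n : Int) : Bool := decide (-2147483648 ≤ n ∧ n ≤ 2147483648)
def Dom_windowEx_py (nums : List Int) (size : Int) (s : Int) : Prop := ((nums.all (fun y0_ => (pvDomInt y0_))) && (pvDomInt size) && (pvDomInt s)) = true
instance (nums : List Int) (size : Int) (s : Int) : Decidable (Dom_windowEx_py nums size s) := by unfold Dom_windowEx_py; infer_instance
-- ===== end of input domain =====

-- B replaces A's running window sum by a precomputed prefix-sum table (alternative decomposition, same cost).

-- ===== PORT A =====
-- the for-loop with early 'return True'; sum is the loop state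
def windowExGo (nums : List Int) (size s : Int) : Int → List Int → Bool
  | _, [] => false
  | sum, i :: rest =>
    let sum1 := if i ≥ size then sum - (PySem.List.pyGet? nums (i - size)).getD 0 else sum
    let sum2 := sum1 + (PySem.List.pyGet? nums i).getD 0
    if sum2 ≥ s then true else windowExGo nums size s sum2 rest

def windowEx_py (nums : List Int) (size : Int) (s : Int) : Bool :=
  windowExGo nums size s 0 (PySem.List.pyRange 0 (nums.length : Int) 1)

-- ===== PORT B =====
-- prefix = [0]; for x in nums: prefix.append(prefix[-1] + x)
def prefixLoop (xs : List Int) (pref : List Int) : List Int :=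
  match xs with
  | [] => pref
  | x :: rest => prefixLoop rest (pref ++ [(PySem.List.pyGet? pref (-1)).getD 0 + x])

def windowEx_py_alt (nums : List Int) (size : Int) (s : Int) : Bool :=
  let pref := prefixLoop nums [0]
  (PySem.List.pyRange 0 (nums.length : Int) 1).any (fun i =>
    decide ((PySem.List.pyGet? pref (i + 1)).getD 0
      - (PySem.List.pyGet? pref (max 0 (i + 1 - size))).getD 0 ≥ s))

-- ===== PRECONDITION & SPEC =====
-- Pre_ restricts to the natural domain of a window size, 0 ≤ size (plus the trivial empty list):
-- a negative window size is outside the function's natural domain: there A indexes nums[i-size]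
-- past the end and raises IndexError on typical non-empty inputs, and B raises IndexError there too.
def Pre_windowEx_py (nums : List Int) (size : Int) (s : Int) : Prop := 0 ≤ size ∨ nums = []
instance (nums : List Int) (size : Int) (s : Int) : Decidable (Pre_windowEx_py nums size s) := by unfold Pre_windowEx_py; infer_instance
def pvWitness_windowEx_py : List Int × Int × Int := ([1, 2, 3], 2, 3)

def Spec_windowEx_py (nums : List Int) (size : Int) (s : Int) (out : Bool) : Prop := out = windowEx_py_alt nums size s
instance (nums : List Int) (size : Int) (s : Int) (out : Bool) : Decidable (Spec_windowEx_py nums size s out) := by unfold Spec_windowEx_py; infer_instance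

-- ===== CLAIM (what is proved, stated in full; the proofs are below) =====
def Claim_equal_windowEx_py : Prop := ∀ (nums : List Int) (size : Int) (s : Int), Dom_windowEx_py nums size s → Pre_windowEx_py nums size s → Spec_windowEx_py nums size s (windowEx_py nums size s)

-- ===== LEMMAS AND PROOFS =====

-- partial sums starting from c (proof-side characterisation of prefixLoop)
def psums (c : Int) : List Int → List Int
  | [] => []
  | x :: xs => (c + x) :: psums (c + x) xs

lemma prefixLoop_eq (xs : List Int) : ∀ (p : List Int) (c : Int),
    prefixLoop xs (p ++ [c]) = (p ++ [c]) ++ psums c xs := by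
  induction xs with
  | nil => intro p c; simp [prefixLoop, psums]
  | cons x xs ih =>
    intro p c
    have hlast : PySem.List.pyGet? (p ++ [c]) (-1) = some c := by
      rw [PySem.List.pyGet?_neg_one]; simp
    simp only [prefixLoop, hlast, Option.getD_some, psums]
    rw [show (p ++ [c]) ++ [c + x] = (p ++ [c]) ++ [c + x] from rfl, ih (p ++ [c]) (c + x)]
    simp

-- Q j = sum of the first j elements (j clamped into [0, n] via toNat)
def Q (nums : List Int) (j : Int) : Int := (nums.take j.toNat).sum

lemma psums_get (xs : List Int) : ∀ (c : Int) (k : Nat), k < xs.length →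
    (psums c xs)[k]? = some (c + (xs.take (k + 1)).sum) := by
  induction xs with
  | nil => intro c k h; simp at h
  | cons x xs ih =>
    intro c k h
    cases k with
    | zero => simp [psums]
    | succ k =>
      simp only [psums, List.getElem?_cons_succ]
      rw [ih (c + x) k (by simpa using h)]
      simp [List.take_succ_cons, add_assoc]

lemma pref_get (nums : List Int) (j : Nat) (hj : j ≤ nums.length) :
    (PySem.List.pyGet? (prefixLoop nums [0]) (j : Int)).getD 0 = Q nums (j : Int) := by
  have h0 : prefixLoop nums [0] = (0 : Int) :: psums 0 nums := by
    have := prefixLoop_eq nums [] 0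
    simpa using this
  rw [h0, PySem.List.pyGet?_natCast]
  cases j with
  | zero => simp [Q]
  | succ j =>
    simp only [List.getElem?_cons_succ]
    rw [psums_get nums 0 j (by omega)]
    simp [Q]

lemma Q_succ (nums : List Int) (j : Nat) (hj : j < nums.length) :
    Q nums ((j : Int) + 1) = Q nums (j : Int) + nums[j] := by
  unfold Q
  have h : ((j : Int) + 1).toNat = j + 1 := by omega
  rw [h, List.sum_take_succ nums j hj]
  simp

-- main loop invariant: starting at index k with A's running sum equal to
-- Q (k) - Q (max 0 (k - size)), the two programs' remaining loops agree.
lemma loop_eq (nums : List Int) (size s : Int) (hsz : 0 ≤ size) :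
    ∀ (m : Nat), ∀ (k : Nat), k + m = nums.length →
    windowExGo nums size s (Q nums (k : Int) - Q nums (max 0 ((k : Int) - size)))
        (PySem.List.pyRange (k : Int) (nums.length : Int) 1)
    = (PySem.List.pyRange (k : Int) (nums.length : Int) 1).any (fun i =>
        decide ((PySem.List.pyGet? (prefixLoop nums [0]) (i + 1)).getD 0
          - (PySem.List.pyGet? (prefixLoop nums [0]) (max 0 (i + 1 - size))).getD 0 ≥ s)) := by
  intro m
  induction m with
  | zero =>
    intro k hk
    rw [PySem.List.pyRange_one_eq_nil (by omega)]
    simp [windowExGo]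
  | succ m ih =>
    intro k hk
    have hkn : k < nums.length := by omega
    rw [PySem.List.pyRange_one_cons (by exact_mod_cast hkn)]
    -- sum after the two updates at i = k
    have hget : (PySem.List.pyGet? nums (k : Int)).getD 0 = nums[k] := by
      rw [PySem.List.pyGet?_natCast, List.getElem?_eq_getElem hkn]; rfl
    have hsum1 : (if (k : Int) ≥ size then
          Q nums (k : Int) - Q nums (max 0 ((k : Int) - size))
            - (PySem.List.pyGet? nums ((k : Int) - size)).getD 0
        else Q nums (k : Int) - Q nums (max 0 ((k : Int) - size)))
        = Q nums (k : Int) - Q nums (max 0 ((k : Int) + 1 - size)) := by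
      by_cases hks : (k : Int) ≥ size
      · rw [if_pos hks]
        set j : Nat := ((k : Int) - size).toNat with hjdef
        have hj1 : ((k : Int) - size) = (j : Int) := by omega
        have hjlt : j < nums.length := by omega
        have hg : (PySem.List.pyGet? nums ((k : Int) - size)).getD 0 = nums[j] := by
          rw [hj1, PySem.List.pyGet?_natCast, List.getElem?_eq_getElem hjlt]; rfl
        have hmax1 : max 0 ((k : Int) - size) = (j : Int) := by omega
        have hmax2 : max 0 ((k : Int) + 1 - size) = (j : Int) + 1 := by omega
        rw [hg, hmax1, hmax2, Q_succ nums j hjlt]; ring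
      · rw [if_neg hks]
        have h1 : max 0 ((k : Int) - size) = 0 := by omega
        have h2 : max 0 ((k : Int) + 1 - size) = 0 := by omega
        rw [h1, h2]
    have hsum2 : Q nums (k : Int) - Q nums (max 0 ((k : Int) + 1 - size)) + nums[k]
        = Q nums ((k : Int) + 1) - Q nums (max 0 ((k : Int) + 1 - size)) := by
      rw [Q_succ nums k hkn]; ring
    -- B's predicate at i = k equals the same comparison
    have hp1 : (PySem.List.pyGet? (prefixLoop nums [0]) ((k : Int) + 1)).getD 0
        = Q nums ((k : Int) + 1) := by
      have : ((k : Int) + 1) = ((k + 1 : Nat) : Int) := by omega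
      rw [this, pref_get nums (k + 1) (by omega)]
    have hp2 : (PySem.List.pyGet? (prefixLoop nums [0]) (max 0 ((k : Int) + 1 - size))).getD 0
        = Q nums (max 0 ((k : Int) + 1 - size)) := by
      set j : Nat := (max 0 ((k : Int) + 1 - size)).toNat with hjdef
      have hj : max 0 ((k : Int) + 1 - size) = (j : Int) := by omega
      rw [hj, pref_get nums j (by omega)]
    simp only [windowExGo, List.any_cons, hget, hsum1, hsum2, hp1, hp2]
    by_cases hcmp : Q nums ((k : Int) + 1) - Q nums (max 0 ((k : Int) + 1 - size)) ≥ s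
    · simp [hcmp]
    · simp only [if_neg hcmp, hcmp, decide_false, Bool.false_or]
      have hcast : (k : Int) + 1 = ((k + 1 : Nat) : Int) := by omega
      have := ih (k + 1) (by omega)
      rw [hcast]
      exact this

-- ===== VERDICT (by name: the statement is the Claim_ definition above) =====
theorem windowEx_py_spec : Claim_equal_windowEx_py := by
  intro nums size s _hdom hpre
  unfold Pre_windowEx_py at hpre
  unfold Spec_windowEx_py windowEx_py windowEx_py_alt
  rcases hpre with hpre | hnil
  case inr =>
    subst hnil
    simp [PySem.List.pyRange_one_eq_nil, windowExGo]
  have h0 : (0 : Int) = ((0 : Nat) : Int) := rfl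
  have := loop_eq nums size s hpre nums.length 0 (by omega)
  have hinit : Q nums ((0 : Nat) : Int) - Q nums (max 0 (((0 : Nat) : Int) - size)) = 0 := by
    have h1 : (max 0 (-size)).toNat = 0 := by omega
    simp [Q, h1]
  rw [hinit] at this
  simpa using this
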